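-- pv_equiv track=rewrite | github.com/PaolaMaribel18/RI_Proyecto_IB | RETRIEVAL INFO/week01/TASK 2/text-searchToken.py | crear_matriz_indices
-- ===== SOURCE A (Python) =====
-- def crear_matriz_indices(archivos_tokenizados):
--     matriz_indices = {}
--     for nombre_archivo, palabras in archivos_tokenizados.items():
--         for palabra in palabras:
--             if palabra in matriz_indices:
--                 matriz_indices[palabra][nombre_archivo] = 1
--             else:
--                 matriz_indices[palabra] = {archivo: 0 for archivo in archivos_tokenizados}
--                 matriz_indices[palabra][nombre_archivo] = 1
--     return matriz_indices
-- ===== SOURCE B (Python) =====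
-- def crear_matriz_indices(archivos_tokenizados):
--     # Index phase: one membership set per file, plus the distinct words
--     # in first-appearance order; then a rectangular word x file fill.
--     word_sets = {archivo: set(palabras)
--                  for archivo, palabras in archivos_tokenizados.items()}
--     palabras_distintas = dict.fromkeys(
--         palabra
--         for palabras in archivos_tokenizados.values()
--         for palabra in palabras)
--     return {palabra: {archivo: 1 if palabra in word_sets[archivo] else 0
--                       for archivo in archivos_tokenizados}
--             for palabra in palabras_distintas}
-- ===== Notes on version B (the rewrite author's own statement) =====
-- stated objective: alternative
-- what changed: Replaces A's single lazy token pass (with an init-all-zeros-then-overwrite branch per token) by an index-build phase (one word set per file, distinct words in first-appearance order) followed by a rectangular word-by-file fill via set membership.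
import Mathlib
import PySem

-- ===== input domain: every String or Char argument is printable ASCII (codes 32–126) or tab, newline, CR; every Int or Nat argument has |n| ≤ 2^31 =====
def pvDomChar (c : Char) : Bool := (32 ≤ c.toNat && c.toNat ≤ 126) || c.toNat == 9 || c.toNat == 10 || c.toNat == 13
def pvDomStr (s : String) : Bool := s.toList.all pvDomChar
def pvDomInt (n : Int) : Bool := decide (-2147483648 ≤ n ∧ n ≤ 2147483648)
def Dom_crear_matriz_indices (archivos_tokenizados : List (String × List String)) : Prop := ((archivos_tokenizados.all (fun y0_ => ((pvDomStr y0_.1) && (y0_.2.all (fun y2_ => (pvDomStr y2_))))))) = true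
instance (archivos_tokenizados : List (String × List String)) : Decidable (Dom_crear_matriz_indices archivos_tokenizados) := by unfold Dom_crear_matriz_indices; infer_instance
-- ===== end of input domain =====

-- B replaces A's lazy per-token matrix build by an index phase (word sets per file,
-- distinct words in order) followed by a rectangular word-by-file membership fill (objective: alternative).


-- ===== PORT A =====
-- matriz_indices = {}; for nombre, palabras in items: for palabra in palabras:
--   if palabra in matriz: matriz[palabra][nombre] = 1
--   else: matriz[palabra] = {archivo: 0 for archivo in archivos_tokenizados}; matriz[palabra][nombre] = 1
def crear_matriz_indices (archivos_tokenizados : List (String × List String)) : List (String × List (String × Int)) :=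
  let m : PySem.Dict String (PySem.Dict String Int) :=
    archivos_tokenizados.foldl (fun m p =>
      p.2.foldl (fun m palabra =>
        match m.get? palabra with
        | some row => m.insert palabra (row.insert p.1 1)
        | none =>
            let zeros : PySem.Dict String Int :=
              archivos_tokenizados.foldl (fun d q => d.insert q.1 0) PySem.Dict.empty
            m.insert palabra (zeros.insert p.1 1)) m) PySem.Dict.empty
  m.items.map (fun r => (r.1, r.2.items))

-- ===== PORT B =====
-- word_sets = {archivo: set(palabras) …}; palabras_distintas = dict.fromkeys(all tokens);
-- return {palabra: {archivo: 1 if palabra in word_sets[archivo] else 0 …} …}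
def crear_matriz_indices_alt (archivos_tokenizados : List (String × List String)) : List (String × List (String × Int)) :=
  let word_sets : List (String × PySem.Set String) :=
    archivos_tokenizados.map (fun p => (p.1, PySem.Set.ofList p.2))
  let palabras_distintas : List String :=
    PySem.List.dedup (archivos_tokenizados.flatMap (fun p => p.2))
  palabras_distintas.map (fun palabra =>
    (palabra, word_sets.map (fun q =>
      (q.1, if PySem.Set.contains q.2 palabra then (1 : Int) else 0))))

-- ===== PRECONDITION & SPEC =====
-- Pre_ excludes only association lists with duplicate file names: the Python argument is a
-- dict, which cannot hold duplicate keys, so such lists encode no Python input.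
def Pre_crear_matriz_indices (archivos_tokenizados : List (String × List String)) : Prop :=
  (archivos_tokenizados.map Prod.fst).Nodup
instance (archivos_tokenizados : List (String × List String)) : Decidable (Pre_crear_matriz_indices archivos_tokenizados) := by unfold Pre_crear_matriz_indices; infer_instance
def pvWitness_crear_matriz_indices : (List (String × List String)) :=
  [("f1.txt", ["hola", "mundo"]), ("f2.txt", ["mundo"])]
def Spec_crear_matriz_indices (archivos_tokenizados : List (String × List String)) (out : List (String × List (String × Int))) : Prop := out = crear_matriz_indices_alt archivos_tokenizados
instance (archivos_tokenizados : List (String × List String)) (out : List (String × List (String × Int))) : Decidable (Spec_crear_matriz_indices archivos_tokenizados out) := by unfold Spec_crear_matriz_indices; infer_instance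

-- ===== CLAIM (what is proved, stated in full; the proofs are below) =====
def Claim_equal_crear_matriz_indices : Prop := ∀ (archivos_tokenizados : List (String × List String)), Dom_crear_matriz_indices archivos_tokenizados → Pre_crear_matriz_indices archivos_tokenizados → Spec_crear_matriz_indices archivos_tokenizados (crear_matriz_indices archivos_tokenizados)

-- ===== LEMMAS AND PROOFS =====

-- the token stream A processes, in order: (file name, word)
def pvTokens (ats : List (String × List String)) : List (String × String) :=
  ats.flatMap (fun p => p.2.map (fun w => (p.1, w)))

-- A's per-token step
def pvStep (ats : List (String × List String))
    (m : PySem.Dict String (PySem.Dict String Int)) (t : String × String) :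
    PySem.Dict String (PySem.Dict String Int) :=
  match m.get? t.2 with
  | some row => m.insert t.2 (row.insert t.1 1)
  | none =>
      let zeros : PySem.Dict String Int := ats.foldl (fun d q => d.insert q.1 0) PySem.Dict.empty
      m.insert t.2 (zeros.insert t.1 1)

-- closed-form matrix after processing the token list `seen`
def pvRow (ats : List (String × List String)) (seen : List (String × String)) (w : String) :
    List (String × Int) :=
  ats.map (fun q => (q.1, if (q.1, w) ∈ seen then (1 : Int) else 0))

def pvM (ats : List (String × List String)) (seen : List (String × String)) :
    PySem.Dict String (PySem.Dict String Int) :=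
  PySem.Dict.mk ((PySem.List.dedup (seen.map Prod.snd)).map
    (fun w => (w, PySem.Dict.mk (pvRow ats seen w))))

theorem pvM_keys (ats : List (String × List String)) (seen : List (String × String)) :
    (pvM ats seen).keys = PySem.List.dedup (seen.map Prod.snd) := by
  simp [pvM, PySem.Dict.keys, List.map_map, Function.comp_def]

theorem pvM_get?_of_mem (ats : List (String × List String)) (seen : List (String × String))
    (w : String) (hw : w ∈ seen.map Prod.snd) :
    (pvM ats seen).get? w = some (PySem.Dict.mk (pvRow ats seen w)) := by
  apply PySem.Dict.get?_of_mem_items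
  · simp only [pvM]
    exact List.mem_map.2 ⟨w, (PySem.List.mem_dedup _ _).2 hw, rfl⟩
  · rw [pvM_keys]; exact PySem.List.nodup_dedup _

theorem pvM_get?_of_not_mem (ats : List (String × List String)) (seen : List (String × String))
    (w : String) (hw : w ∉ seen.map Prod.snd) :
    (pvM ats seen).get? w = none := by
  rw [PySem.Dict.get?_eq_none_iff_not_mem_keys, pvM_keys]
  exact fun h => hw ((PySem.List.mem_dedup _ _).1 h)

theorem pvRow_append_of_ne (ats : List (String × List String)) (seen : List (String × String))
    (f w w' : String) (h : w' ≠ w) :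
    pvRow ats (seen ++ [(f, w)]) w' = pvRow ats seen w' := by
  simp only [pvRow]
  apply List.map_congr_left
  intro q _
  have hiff : ((q.1, w') ∈ seen ++ [(f, w)]) ↔ (q.1, w') ∈ seen := by
    simp [List.mem_append, h]
  simp [hiff]

theorem pvRow_append_self (ats : List (String × List String)) (seen : List (String × String))
    (f w : String) :
    pvRow ats (seen ++ [(f, w)]) w =
      (pvRow ats seen w).map (fun p => if p.1 == f then (f, (1 : Int)) else p) := by
  simp only [pvRow, List.map_map]
  apply List.map_congr_left
  intro q _
  simp only [Function.comp_apply]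
  by_cases h : q.1 = f
  · simp [h]
  · simp [h]

theorem pvRow_of_not_mem (ats : List (String × List String)) (seen : List (String × String))
    (w : String) (hw : w ∉ seen.map Prod.snd) :
    pvRow ats seen w = ats.map (fun q => (q.1, (0 : Int))) := by
  simp only [pvRow]
  apply List.map_congr_left
  intro q _
  have hn : (q.1, w) ∉ seen := fun hc => hw (List.mem_map.2 ⟨_, hc, rfl⟩)
  simp [hn]

theorem pvDedup_append (xs : List String) (x : String) :
    PySem.List.dedup (xs ++ [x]) =
      if x ∈ xs then PySem.List.dedup xs else PySem.List.dedup xs ++ [x] := by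
  simp only [PySem.List.dedup_eq_ofList, PySem.Set.ofList_eq_foldl, List.foldl_append,
    List.foldl_cons, List.foldl_nil]
  rw [← PySem.Set.ofList_eq_foldl]
  by_cases h : x ∈ xs
  · have hc : (PySem.Set.ofList xs).contains x = true :=
      (PySem.Set.contains_iff _ _).2 ((PySem.Set.mem_ofList _ _).2 h)
    simp [PySem.Set.add]
  · have hc : (PySem.Set.ofList xs).contains x = false := by
      rw [← Bool.not_eq_true]
      intro hcc
      exact h ((PySem.Set.mem_ofList _ _).1 ((PySem.Set.contains_iff _ _).1 hcc))
    simp [PySem.Set.add]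

theorem pvRowIns (ats : List (String × List String)) (seen : List (String × String))
    (f w : String) (hf : f ∈ ats.map Prod.fst) :
    (PySem.Dict.mk (pvRow ats seen w)).insert f 1
      = PySem.Dict.mk (pvRow ats (seen ++ [(f, w)]) w) := by
  have hc : (PySem.Dict.mk (pvRow ats seen w)).contains f = true := by
    rw [PySem.Dict.contains_iff_mem_keys]
    simp only [PySem.Dict.keys, pvRow]
    show f ∈ (List.map _ (List.map _ ats))
    rw [List.map_map]
    simpa [Function.comp_def] using hf
  apply PySem.Dict.ext
  rw [PySem.Dict.items_insert_of_contains _ _ hc]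
  show List.map _ (pvRow ats seen w) = pvRow ats (seen ++ [(f, w)]) w
  exact (pvRow_append_self ats seen f w).symm

theorem pvStep_inv (ats : List (String × List String))
    (hnd : (ats.map Prod.fst).Nodup) (seen : List (String × String))
    (t : String × String) (ht : t.1 ∈ ats.map Prod.fst) :
    pvStep ats (pvM ats seen) t = pvM ats (seen ++ [t]) := by
  obtain ⟨f, w⟩ := t
  simp only at ht
  by_cases hw : w ∈ seen.map Prod.snd
  · -- palabra already in the matrix: update its row in place
    have hget := pvM_get?_of_mem ats seen w hw
    simp only [pvStep, hget]
    rw [pvRowIns ats seen f w ht]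
    apply PySem.Dict.ext
    have hcon : (pvM ats seen).contains w = true := by
      rw [PySem.Dict.contains_iff_mem_keys, pvM_keys]
      exact (PySem.List.mem_dedup _ _).2 hw
    rw [PySem.Dict.items_insert_of_contains _ _ hcon]
    show List.map _ (List.map _ (PySem.List.dedup (seen.map Prod.snd)))
        = List.map _ (PySem.List.dedup ((seen ++ [(f, w)]).map Prod.snd))
    rw [List.map_append]
    simp only [List.map_cons, List.map_nil]
    rw [pvDedup_append, if_pos hw, List.map_map]
    apply List.map_congr_left
    intro w' _
    simp only [Function.comp_apply]
    by_cases h : w' = w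
    · subst h; simp
    · have hne : (w' == w) = false := by simp [h]
      simp only [hne, Bool.false_eq_true, if_false]
      rw [pvRow_append_of_ne ats seen f w w' h]
  · -- fresh palabra: build the all-zeros row, then set this file to 1
    have hget := pvM_get?_of_not_mem ats seen w hw
    simp only [pvStep, hget]
    have hzeros :
        (ats.foldl (fun d q => d.insert q.1 (0 : Int)) PySem.Dict.empty)
          = PySem.Dict.mk (pvRow ats seen w) := by
      apply PySem.Dict.ext
      rw [PySem.Dict.items_foldl_insert_fresh ats (fun q => q.1) (fun _ => (0 : Int))
        PySem.Dict.empty (fun a _ => rfl) (by simpa [Function.comp_def] using hnd)]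
      rw [pvRow_of_not_mem ats seen w hw]
      rfl
    rw [hzeros, pvRowIns ats seen f w ht]
    apply PySem.Dict.ext
    have hcon : (pvM ats seen).contains w = false := by
      rw [← Bool.not_eq_true, PySem.Dict.contains_iff_mem_keys, pvM_keys]
      intro hc
      exact hw ((PySem.List.mem_dedup _ _).1 hc)
    rw [PySem.Dict.items_insert_of_not_contains _ _ hcon]
    show List.map _ (PySem.List.dedup (seen.map Prod.snd)) ++ _
        = List.map _ (PySem.List.dedup ((seen ++ [(f, w)]).map Prod.snd))
    rw [List.map_append]
    simp only [List.map_cons, List.map_nil]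
    rw [pvDedup_append, if_neg hw, List.map_append]
    congr 1
    apply List.map_congr_left
    intro w' hw'
    have h : w' ≠ w := fun hc => hw (hc ▸ (PySem.List.mem_dedup _ _).1 hw')
    rw [pvRow_append_of_ne ats seen f w w' h]

theorem pvFold_inv (ats : List (String × List String))
    (hnd : (ats.map Prod.fst).Nodup) (l seen : List (String × String))
    (hl : ∀ t ∈ l, t.1 ∈ ats.map Prod.fst) :
    l.foldl (pvStep ats) (pvM ats seen) = pvM ats (seen ++ l) := by
  induction l generalizing seen with
  | nil => simp
  | cons t l ih =>
      rw [List.foldl_cons, pvStep_inv ats hnd seen t (hl t (by simp)),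
        ih (seen ++ [t]) (fun x hx => hl x (by simp [hx]))]
      simp

theorem pvFoldl_flatMap {α β γ : Type} (l : List α) (f : α → List β) (g : γ → β → γ)
    (init : γ) :
    (l.flatMap f).foldl g init = l.foldl (fun acc a => (f a).foldl g acc) init := by
  induction l generalizing init with
  | nil => rfl
  | cons a l ih => simp [List.flatMap_cons, List.foldl_append, ih]

theorem pvA_eq_fold (ats : List (String × List String)) :
    crear_matriz_indices ats =
      ((pvTokens ats).foldl (pvStep ats) PySem.Dict.empty).items.map (fun r => (r.1, r.2.items)) := by
  simp only [crear_matriz_indices]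
  rw [pvTokens, pvFoldl_flatMap]
  congr 2
  congr 1
  funext m p
  rw [List.foldl_map]
  rfl

theorem pvTokens_mem (ats : List (String × List String))
    (hnd : (ats.map Prod.fst).Nodup) (q : String × List String) (hq : q ∈ ats) (w : String) :
    ((q.1, w) ∈ pvTokens ats) ↔ w ∈ q.2 := by
  constructor
  · intro h
    simp only [pvTokens, List.mem_flatMap, List.mem_map] at h
    obtain ⟨p, hp, w', hw', heq⟩ := h
    have h1 : p.1 = q.1 := (Prod.ext_iff.1 heq).1
    have h2 : w' = w := (Prod.ext_iff.1 heq).2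
    have hpq : p = q := List.inj_on_of_nodup_map hnd hp hq h1
    subst hpq h2; exact hw'
  · intro h
    simp only [pvTokens, List.mem_flatMap, List.mem_map]
    exact ⟨q, hq, w, h, rfl⟩

-- ===== VERDICT (by name: the statement is the Claim_ definition above) =====
theorem crear_matriz_indices_spec : Claim_equal_crear_matriz_indices := by
  intro ats _ hpre
  unfold Spec_crear_matriz_indices
  rw [pvA_eq_fold]
  have h := pvFold_inv ats hpre (pvTokens ats) [] ?side
  · rw [show pvM ats [] = PySem.Dict.empty by simp [pvM, pvRow, PySem.Dict.empty]] at h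
    rw [h]
    simp only [List.nil_append, pvM, crear_matriz_indices_alt, List.map_map]
    have hmapsnd : (pvTokens ats).map Prod.snd = ats.flatMap (fun p => p.2) := by
      simp [pvTokens, List.map_flatMap, List.map_map]
    rw [hmapsnd]
    apply List.map_congr_left
    intro w _
    simp only [Function.comp]
    refine Prod.ext rfl ?_
    show (PySem.Dict.mk (pvRow ats (pvTokens ats) w)).items = _
    show pvRow ats (pvTokens ats) w = _
    simp only [pvRow]
    apply List.map_congr_left
    intro q hq
    simp only [Function.comp]
    have : ((q.1, w) ∈ pvTokens ats) ↔ w ∈ q.2 := pvTokens_mem ats hpre q hq w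
    by_cases hw : w ∈ q.2
    · simp [this.2 hw, hw]
    · have h1 : ¬ ((q.1, w) ∈ pvTokens ats) := fun hc => hw (this.1 hc)
      have h2 : PySem.Set.contains (PySem.Set.ofList q.2) w = false := by
        rw [← Bool.not_eq_true]
        intro hc
        exact hw ((PySem.Set.mem_ofList _ _).1 ((PySem.Set.contains_iff _ _).1 hc))
      simp [h1, hw]
  · intro t ht
    simp only [pvTokens, List.mem_flatMap, List.mem_map] at ht
    obtain ⟨p, hp, w', _, heq⟩ := ht
    exact heq ▸ List.mem_map_of_mem hp
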